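-- pv_equiv track=rewrite | github.com/emre-sahin0/store-performance-report-system-update- | app.py | group_missing_products_by_brand
-- ===== SOURCE A (Python) =====
-- def group_missing_products_by_brand(products):
--     grouped = {"AdaHome": [], "AdaWall": [], "AdaPanel": [], "Diğer": []}
--     for urun in products:
--         urun_lower = urun.lower()
--         if "adahome" in urun_lower:
--             grouped["AdaHome"].append(urun)
--         elif "adawall" in urun_lower:
--             grouped["AdaWall"].append(urun)
--         elif "adapanel" in urun_lower:
--             grouped["AdaPanel"].append(urun)
--         else:
--             grouped["Diğer"].append(urun)
--     return grouped
-- ===== SOURCE B (Python) =====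
-- _BRANDS = ("AdaHome", "AdaWall", "AdaPanel", "Di\u011fer")
--
--
-- def _brand(product):
--     p = product.lower()
--     if "adahome" in p:
--         return "AdaHome"
--     if "adawall" in p:
--         return "AdaWall"
--     if "adapanel" in p:
--         return "AdaPanel"
--     return "Di\u011fer"
--
--
-- def group_missing_products_by_brand(products):
--     return {k: [p for p in products if _brand(p) == k] for k in _BRANDS}
-- ===== Notes on version B (the rewrite author's own statement) =====
-- stated objective: idiomatic
-- what changed: Replaces the single loop that appends into a pre-built mutable dict with a total classification function plus a dict comprehension that builds each bucket by filtering the input per key.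
import Mathlib
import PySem

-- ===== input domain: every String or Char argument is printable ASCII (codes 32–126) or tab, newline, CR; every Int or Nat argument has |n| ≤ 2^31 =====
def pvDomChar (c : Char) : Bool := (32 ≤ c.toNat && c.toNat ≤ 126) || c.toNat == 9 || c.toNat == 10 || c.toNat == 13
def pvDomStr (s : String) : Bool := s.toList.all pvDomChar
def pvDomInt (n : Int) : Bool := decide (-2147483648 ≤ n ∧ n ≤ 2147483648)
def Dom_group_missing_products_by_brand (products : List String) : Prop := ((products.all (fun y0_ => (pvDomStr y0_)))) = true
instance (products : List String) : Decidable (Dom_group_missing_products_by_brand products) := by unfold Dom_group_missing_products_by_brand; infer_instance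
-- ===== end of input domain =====

-- B replaces A's appending loop over a mutable dict with a classification
-- function and one filter pass per bucket key (idiomatic decomposition).

-- ===== PORT A =====
-- the body of A's for-loop (the dict update for one product)
def pvStep (d : PySem.Dict String (List String)) (urun : String) : PySem.Dict String (List String) :=
  let urun_lower := PySem.Str.lower urun
  if PySem.Str.isIn "adahome" urun_lower then d.modify "AdaHome" [] (· ++ [urun])
  else if PySem.Str.isIn "adawall" urun_lower then d.modify "AdaWall" [] (· ++ [urun])
  else if PySem.Str.isIn "adapanel" urun_lower then d.modify "AdaPanel" [] (· ++ [urun])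
  else d.modify "Diğer" [] (· ++ [urun])

def group_missing_products_by_brand (products : List String) : List (String × List String) :=
  let grouped : PySem.Dict String (List String) :=
    PySem.Dict.mk [("AdaHome", []), ("AdaWall", []), ("AdaPanel", []), ("Diğer", [])]
  (products.foldl pvStep grouped).items

-- ===== PORT B =====
def pvBrandOf (product : String) : String :=
  let p := PySem.Str.lower product
  if PySem.Str.isIn "adahome" p then "AdaHome"
  else if PySem.Str.isIn "adawall" p then "AdaWall"
  else if PySem.Str.isIn "adapanel" p then "AdaPanel"
  else "Diğer"

def group_missing_products_by_brand_alt (products : List String) : List (String × List String) :=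
  ["AdaHome", "AdaWall", "AdaPanel", "Diğer"].map
    (fun k => (k, products.filter (fun p => pvBrandOf p == k)))

-- ===== PRECONDITION & SPEC =====
def Spec_group_missing_products_by_brand (products : List String) (out : List (String × List String)) : Prop := out = group_missing_products_by_brand_alt products
instance (products : List String) (out : List (String × List String)) : Decidable (Spec_group_missing_products_by_brand products out) := by unfold Spec_group_missing_products_by_brand; infer_instance

-- ===== CLAIM (what is proved, stated in full; the proofs are below) =====
def Claim_equal_group_missing_products_by_brand : Prop := ∀ (products : List String), Dom_group_missing_products_by_brand products → Spec_group_missing_products_by_brand products (group_missing_products_by_brand products)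

-- ===== LEMMAS AND PROOFS =====

-- loop invariant: from any four accumulators, A's fold appends to each bucket
-- exactly the products B's classifier assigns to it, in input order
lemma pvInv (l : List String) (a b c e : List String) :
    (l.foldl pvStep (PySem.Dict.mk [("AdaHome", a), ("AdaWall", b), ("AdaPanel", c), ("Diğer", e)])).items
    = [("AdaHome", a ++ l.filter (fun p => pvBrandOf p == "AdaHome")),
       ("AdaWall", b ++ l.filter (fun p => pvBrandOf p == "AdaWall")),
       ("AdaPanel", c ++ l.filter (fun p => pvBrandOf p == "AdaPanel")),
       ("Diğer", e ++ l.filter (fun p => pvBrandOf p == "Diğer"))] := by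
  induction l generalizing a b c e with
  | nil => simp
  | cons x xs ih =>
    by_cases h1 : PySem.Chars.isIn ['a','d','a','h','o','m','e'] (PySem.Chars.lower x.toList) = true
    · have hb : pvBrandOf x = "AdaHome" := by simp [pvBrandOf, h1]
      have hstep : pvStep (PySem.Dict.mk [("AdaHome", a), ("AdaWall", b), ("AdaPanel", c), ("Diğer", e)]) x
          = PySem.Dict.mk [("AdaHome", a ++ [x]), ("AdaWall", b), ("AdaPanel", c), ("Diğer", e)] := by
        simp [pvStep, h1, PySem.Dict.modify, PySem.Dict.insert, PySem.Dict.getD, PySem.Dict.get?, PySem.Dict.contains]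
      rw [List.foldl_cons, hstep, ih]
      simp [hb]
    · by_cases h2 : PySem.Chars.isIn ['a','d','a','w','a','l','l'] (PySem.Chars.lower x.toList) = true
      · have hb : pvBrandOf x = "AdaWall" := by simp [pvBrandOf, h1, h2]
        have hstep : pvStep (PySem.Dict.mk [("AdaHome", a), ("AdaWall", b), ("AdaPanel", c), ("Diğer", e)]) x
            = PySem.Dict.mk [("AdaHome", a), ("AdaWall", b ++ [x]), ("AdaPanel", c), ("Diğer", e)] := by
          simp [pvStep, h1, h2, PySem.Dict.modify, PySem.Dict.insert, PySem.Dict.getD, PySem.Dict.get?, PySem.Dict.contains]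
        rw [List.foldl_cons, hstep, ih]
        simp [hb]
      · by_cases h3 : PySem.Chars.isIn ['a','d','a','p','a','n','e','l'] (PySem.Chars.lower x.toList) = true
        · have hb : pvBrandOf x = "AdaPanel" := by simp [pvBrandOf, h1, h2, h3]
          have hstep : pvStep (PySem.Dict.mk [("AdaHome", a), ("AdaWall", b), ("AdaPanel", c), ("Diğer", e)]) x
              = PySem.Dict.mk [("AdaHome", a), ("AdaWall", b), ("AdaPanel", c ++ [x]), ("Diğer", e)] := by
            simp [pvStep, h1, h2, h3, PySem.Dict.modify, PySem.Dict.insert, PySem.Dict.getD, PySem.Dict.get?, PySem.Dict.contains]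
          rw [List.foldl_cons, hstep, ih]
          simp [hb]
        · have hb : pvBrandOf x = "Diğer" := by simp [pvBrandOf, h1, h2, h3]
          have hstep : pvStep (PySem.Dict.mk [("AdaHome", a), ("AdaWall", b), ("AdaPanel", c), ("Diğer", e)]) x
              = PySem.Dict.mk [("AdaHome", a), ("AdaWall", b), ("AdaPanel", c), ("Diğer", e ++ [x])] := by
            simp [pvStep, h1, h2, h3, PySem.Dict.modify, PySem.Dict.insert, PySem.Dict.getD, PySem.Dict.get?, PySem.Dict.contains]
          rw [List.foldl_cons, hstep, ih]
          simp [hb]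

-- ===== VERDICT (by name: the statement is the Claim_ definition above) =====
theorem group_missing_products_by_brand_spec : Claim_equal_group_missing_products_by_brand := by
  intro products _
  unfold Spec_group_missing_products_by_brand group_missing_products_by_brand group_missing_products_by_brand_alt
  simpa using pvInv products [] [] [] []
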